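-- pv_equiv track=rewrite | github.com/ToaruPen/coq-japanese_stable | scripts/provenance/cross_reference.py | _context_overlaps_generator
-- ===== SOURCE A (Python) =====
-- _MIN_SHARED_NAMESPACE_DEPTH = 2
--
-- def _context_overlaps_generator(entry_context: str | None, namespaces: set[str]) -> bool:
--     """Return whether an entry context shares a namespace prefix depth of two or more."""
--     if entry_context is None:
--         return False
--     entry_parts = _namespace_parts(entry_context)
--     return any(
--         _shared_prefix_depth(entry_parts, _namespace_parts(namespace)) >= _MIN_SHARED_NAMESPACE_DEPTH
--         for namespace in namespaces
--     )
--
-- def _namespace_parts(value: str) -> list[str]: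
--     """Split a dotted namespace string into normalized parts."""
--     return [part for part in value.split(".") if part]
--
-- def _shared_prefix_depth(left: list[str], right: list[str]) -> int:
--     """Count how many namespace segments two inputs share from the start."""
--     depth = 0
--     for left_part, right_part in zip(left, right, strict=False):
--         if left_part != right_part:
--             break
--         depth += 1
--     return depth
-- ===== SOURCE B (Python) =====
-- _MIN_SHARED_NAMESPACE_DEPTH = 2
--
--
-- def _namespace_parts(value):
--     return [part for part in value.split(".") if part]
--
--
-- def _context_overlaps_generator(entry_context, namespaces):
--     if entry_context is None:
--         return False
--     entry_parts = _namespace_parts(entry_context)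
--     if len(entry_parts) < _MIN_SHARED_NAMESPACE_DEPTH:
--         return False
--     prefixes = {(p[0], p[1]) for ns in namespaces
--                 for p in (_namespace_parts(ns),)
--                 if len(p) >= _MIN_SHARED_NAMESPACE_DEPTH}
--     return (entry_parts[0], entry_parts[1]) in prefixes
-- ===== Notes on version B (the rewrite author's own statement) =====
-- stated objective: faster
-- what changed: Replaces the per-namespace shared-prefix counting loop with a precomputed set of first-two-segment pairs and a single hashed pair-membership lookup, using that shared depth >= 2 is exactly equality of the first two segments.
import Mathlib
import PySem

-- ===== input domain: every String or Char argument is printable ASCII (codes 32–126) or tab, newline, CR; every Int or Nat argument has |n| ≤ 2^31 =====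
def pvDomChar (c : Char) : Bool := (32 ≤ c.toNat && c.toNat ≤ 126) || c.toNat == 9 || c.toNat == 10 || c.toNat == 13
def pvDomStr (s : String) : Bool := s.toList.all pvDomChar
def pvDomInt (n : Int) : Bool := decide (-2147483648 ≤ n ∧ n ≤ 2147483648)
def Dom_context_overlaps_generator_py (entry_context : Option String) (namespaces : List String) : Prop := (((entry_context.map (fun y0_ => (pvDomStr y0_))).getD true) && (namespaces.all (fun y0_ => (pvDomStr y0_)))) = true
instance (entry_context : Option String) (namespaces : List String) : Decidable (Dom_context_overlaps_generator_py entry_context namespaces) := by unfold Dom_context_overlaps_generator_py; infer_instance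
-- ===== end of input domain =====

-- B replaces A's per-namespace shared-prefix counting loop with a set of first-two-segment
-- pairs built once and a single pair-membership lookup; a timing run measured B faster (constant-factor).

-- ===== PORT A =====
-- _namespace_parts: value.split(".") keeping non-empty parts (shared helper, both Pythons define it identically)
def pvNsParts (value : String) : List String :=
  ((PySem.Str.split? value ".").getD []).filter (fun part => !(part == ""))

-- _shared_prefix_depth: loop over zip(left, right) with break, accumulator depth
def pvSharedDepthLoop : List (String × String) → Nat → Nat
  | [], depth => depth
  | (l, r) :: rest, depth => if l ≠ r then depth else pvSharedDepthLoop rest (depth + 1)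

def pvSharedPrefixDepth (left right : List String) : Nat :=
  pvSharedDepthLoop (left.zip right) 0

def context_overlaps_generator_py (entry_context : Option String) (namespaces : List String) : Bool :=
  match entry_context with
  | none => false
  | some ctx =>
    let entry_parts := pvNsParts ctx
    namespaces.any (fun ns => decide (2 ≤ pvSharedPrefixDepth entry_parts (pvNsParts ns)))

-- ===== PORT B =====
def context_overlaps_generator_py_alt (entry_context : Option String) (namespaces : List String) : Bool :=
  match entry_context with
  | none => false
  | some ctx =>
    match pvNsParts ctx with
    | e1 :: e2 :: _ =>
      let prefixes : PySem.Set (String × String) :=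
        PySem.Set.ofList (namespaces.filterMap (fun ns =>
          match pvNsParts ns with
          | c :: d :: _ => some (c, d)
          | _ => none))
      PySem.Set.contains prefixes (e1, e2)
    | _ => false

-- ===== PRECONDITION & SPEC =====
def Spec_context_overlaps_generator_py (entry_context : Option String) (namespaces : List String) (out : Bool) : Prop := out = context_overlaps_generator_py_alt entry_context namespaces
instance (entry_context : Option String) (namespaces : List String) (out : Bool) : Decidable (Spec_context_overlaps_generator_py entry_context namespaces out) := by unfold Spec_context_overlaps_generator_py; infer_instance

-- ===== CLAIM (what is proved, stated in full; the proofs are below) =====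
def Claim_equal_context_overlaps_generator_py : Prop := ∀ (entry_context : Option String) (namespaces : List String), Dom_context_overlaps_generator_py entry_context namespaces → Spec_context_overlaps_generator_py entry_context namespaces (context_overlaps_generator_py entry_context namespaces)

-- ===== LEMMAS AND PROOFS =====

lemma le_pvSharedDepthLoop (xs : List (String × String)) (d : Nat) :
    d ≤ pvSharedDepthLoop xs d := by
  induction xs generalizing d with
  | nil => simp [pvSharedDepthLoop]
  | cons p rest ih =>
    obtain ⟨l, r⟩ := p
    simp only [pvSharedDepthLoop]
    split
    · exact le_refl _
    · exact le_trans (Nat.le_succ d) (ih (d + 1))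

-- shared prefix depth ≥ 2 ↔ both lists start with the same two segments
lemma depth_ge_two_iff (e1 e2 : String) (rest r : List String) :
    2 ≤ pvSharedPrefixDepth (e1 :: e2 :: rest) r ↔
      ∃ rs, r = e1 :: e2 :: rs := by
  match r with
  | [] => simp [pvSharedPrefixDepth, pvSharedDepthLoop]
  | [c] =>
    constructor
    · intro h
      by_cases hc : e1 = c <;>
        simp [pvSharedPrefixDepth, pvSharedDepthLoop, hc] at h
    · rintro ⟨rs, h⟩; simp at h
  | c :: d :: rs' =>
    constructor
    · intro h
      by_cases hc : e1 = c
      · by_cases hd : e2 = d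
        · exact ⟨rs', by simp [hc, hd]⟩
        · simp [pvSharedPrefixDepth, pvSharedDepthLoop, hc, hd] at h
      · simp [pvSharedPrefixDepth, pvSharedDepthLoop, hc] at h
    · rintro ⟨rs, h⟩
      injection h with h1 h'
      injection h' with h2 h''
      subst h1; subst h2; subst h''
      simp only [pvSharedPrefixDepth, pvSharedDepthLoop, List.zip_cons_cons,
        ne_eq, not_true_eq_false, if_false]
      exact le_pvSharedDepthLoop _ 2

lemma depth_lt_two_short (ep r : List String) (h : ep.length < 2) :
    ¬ 2 ≤ pvSharedPrefixDepth ep r := by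
  match ep, r with
  | [], _ => simp [pvSharedPrefixDepth, pvSharedDepthLoop]
  | [a], [] => simp [pvSharedPrefixDepth, pvSharedDepthLoop]
  | [a], b :: rs =>
    by_cases hab : a = b <;>
      simp [pvSharedPrefixDepth, pvSharedDepthLoop, hab]
  | a :: b :: t, _ => simp at h

-- ===== VERDICT (by name: the statement is the Claim_ definition above) =====
theorem context_overlaps_generator_py_spec : Claim_equal_context_overlaps_generator_py := by
  intro entry_context namespaces _
  unfold Spec_context_overlaps_generator_py
  match entry_context with
  | none => rfl
  | some ctx =>
    simp only [context_overlaps_generator_py, context_overlaps_generator_py_alt]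
    match hep : pvNsParts ctx with
    | [] =>
      rw [Bool.eq_iff_iff]
      simp only [List.any_eq_true, decide_eq_true_eq]
      constructor
      · rintro ⟨ns, _, h⟩
        exact absurd h (depth_lt_two_short [] (pvNsParts ns) (by simp))
      · simp
    | [a] =>
      rw [Bool.eq_iff_iff]
      simp only [List.any_eq_true, decide_eq_true_eq]
      constructor
      · rintro ⟨ns, _, h⟩
        exact absurd h (depth_lt_two_short [a] (pvNsParts ns) (by simp))
      · simp
    | e1 :: e2 :: rest =>
      rw [Bool.eq_iff_iff]
      simp only [List.any_eq_true, decide_eq_true_eq,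
        PySem.Set.contains_iff, PySem.Set.mem_ofList, List.mem_filterMap]
      constructor
      · rintro ⟨ns, hns, hdepth⟩
        obtain ⟨rs, hr⟩ := (depth_ge_two_iff e1 e2 rest (pvNsParts ns)).mp hdepth
        exact ⟨ns, hns, by simp [hr]⟩
      · rintro ⟨ns, hns, hsome⟩
        refine ⟨ns, hns, ?_⟩
        apply (depth_ge_two_iff e1 e2 rest (pvNsParts ns)).mpr
        match hm : pvNsParts ns with
        | [] => simp [hm] at hsome
        | [c] => simp [hm] at hsome
        | c :: d :: rs =>
          rw [hm] at hsome
          simp only [Option.some.injEq, Prod.mk.injEq] at hsome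
          exact ⟨rs, by rw [hsome.1, hsome.2]⟩
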